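-- pv_equiv track=rewrite | github.com/Lantuu/perf_code | perf_code/extract_desc_from_github_issue/completeAPI.py | get_shorter_api
-- ===== SOURCE A (Python) =====
-- def get_shorter_api(api_list):
--     fullname_len1 = []
--     fullname_len2 = []
--     fullname_len3 = []
--     fullname_len4 = []
--     fullname_lenother = []
--     for api in api_list:
--         api_len = len(str(api)) - len(str(api).replace('.', ''))
--         if api_len == 1:
--             fullname_len1.append(api)
--         elif api_len == 2:
--             fullname_len2.append(api)
--         elif api_len == 3:
--             fullname_len3.append(api)
--         elif api_len == 4:
--             fullname_len4.append(api)
--         else: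
--             fullname_lenother.append(api)
--     if len(fullname_len1) != 0:
--         return fullname_len1
--     elif len(fullname_len2) != 0:
--         return fullname_len2
--     elif len(fullname_len3) != 0:
--         return fullname_len3
--     elif len(fullname_len4) != 0:
--         return fullname_len4
--     else:
--         return fullname_lenother
-- ===== SOURCE B (Python) =====
-- def get_shorter_api(api_list):
--     # find the best (lowest) priority present, then filter; order preserved
--     def prio(api):
--         d = len(str(api)) - len(str(api).replace('.', ''))
--         return d - 1 if 1 <= d <= 4 else 4
--     if not api_list:
--         return []
--     best = min(prio(api) for api in api_list)
--     return [api for api in api_list if prio(api) == best]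
-- ===== Notes on version B (the rewrite author's own statement) =====
-- stated objective: simpler
-- what changed: Replaces the five parallel bucket lists and the five-way if/elif return chain by a priority function (dot-count 1..4 -> 0..3, else 4), one pass to find the minimum priority present, and one filter pass that keeps elements of that priority in order.
import Mathlib
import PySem

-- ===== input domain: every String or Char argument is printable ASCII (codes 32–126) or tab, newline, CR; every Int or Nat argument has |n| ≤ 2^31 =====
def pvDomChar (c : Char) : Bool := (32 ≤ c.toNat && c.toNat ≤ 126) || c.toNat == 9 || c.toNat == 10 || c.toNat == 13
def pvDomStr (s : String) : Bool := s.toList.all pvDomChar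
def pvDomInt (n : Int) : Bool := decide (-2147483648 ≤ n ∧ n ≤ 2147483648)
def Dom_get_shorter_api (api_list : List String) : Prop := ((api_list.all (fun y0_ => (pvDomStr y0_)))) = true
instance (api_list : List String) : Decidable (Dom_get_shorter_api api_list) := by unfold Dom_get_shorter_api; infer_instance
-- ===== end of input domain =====

-- B replaces A's five parallel bucket lists and five-way return chain by a
-- priority function plus min-then-filter decomposition (simpler; same O(n) cost).


-- ===== PORT A =====
-- api_len = len(str(api)) - len(str(api).replace('.', ''))
def gsaDots (s : String) : Int :=
  PySem.Str.len s - PySem.Str.len (PySem.Str.replace s "." "")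

-- one iteration of A's bucketing loop over the five accumulator lists
def gsaStep (b : List String × List String × List String × List String × List String)
    (api : String) : List String × List String × List String × List String × List String :=
  let api_len := gsaDots api
  if api_len = 1 then (b.1 ++ [api], b.2.1, b.2.2.1, b.2.2.2.1, b.2.2.2.2)
  else if api_len = 2 then (b.1, b.2.1 ++ [api], b.2.2.1, b.2.2.2.1, b.2.2.2.2)
  else if api_len = 3 then (b.1, b.2.1, b.2.2.1 ++ [api], b.2.2.2.1, b.2.2.2.2)
  else if api_len = 4 then (b.1, b.2.1, b.2.2.1, b.2.2.2.1 ++ [api], b.2.2.2.2)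
  else (b.1, b.2.1, b.2.2.1, b.2.2.2.1, b.2.2.2.2 ++ [api])

def get_shorter_api (api_list : List String) : List String :=
  let r := api_list.foldl gsaStep ([], [], [], [], [])
  if r.1 ≠ [] then r.1
  else if r.2.1 ≠ [] then r.2.1
  else if r.2.2.1 ≠ [] then r.2.2.1
  else if r.2.2.2.1 ≠ [] then r.2.2.2.1
  else r.2.2.2.2

-- ===== PORT B =====
-- prio(api) = d - 1 if 1 <= d <= 4 else 4, with d the dot count
def gsaPrio (s : String) : Int :=
  let d := gsaDots s
  if 1 ≤ d ∧ d ≤ 4 then d - 1 else 4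

def get_shorter_api_alt (api_list : List String) : List String :=
  if api_list = [] then []
  else
    match PySem.List.min? (api_list.map gsaPrio) (fun x => x) with
    | none => []
    | some best => api_list.filter (fun a => gsaPrio a == best)

-- ===== PRECONDITION & SPEC =====
def Spec_get_shorter_api (api_list : List String) (out : List String) : Prop := out = get_shorter_api_alt api_list
instance (api_list : List String) (out : List String) : Decidable (Spec_get_shorter_api api_list out) := by unfold Spec_get_shorter_api; infer_instance

-- ===== CLAIM (what is proved, stated in full; the proofs are below) =====
def Claim_equal_get_shorter_api : Prop := ∀ (api_list : List String), Dom_get_shorter_api api_list → Spec_get_shorter_api api_list (get_shorter_api api_list)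

-- ===== LEMMAS AND PROOFS =====

-- A's fold produces, in each bucket, exactly the elements of that priority, in order.
theorem gsa_fold (l : List String) (a0 a1 a2 a3 a4 : List String) :
    l.foldl gsaStep (a0, a1, a2, a3, a4) =
      (a0 ++ l.filter (fun s => gsaPrio s == 0),
       a1 ++ l.filter (fun s => gsaPrio s == 1),
       a2 ++ l.filter (fun s => gsaPrio s == 2),
       a3 ++ l.filter (fun s => gsaPrio s == 3),
       a4 ++ l.filter (fun s => gsaPrio s == 4)) := by
  induction l generalizing a0 a1 a2 a3 a4 with
  | nil => simp
  | cons x t ih =>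
    by_cases h1 : gsaDots x = 1
    · simp [gsaStep, gsaPrio, h1, ih, List.append_assoc]
    · by_cases h2 : gsaDots x = 2
      · simp [gsaStep, gsaPrio, h2, ih, List.append_assoc]
      · by_cases h3 : gsaDots x = 3
        · simp [gsaStep, gsaPrio, h3, ih, List.append_assoc]
        · by_cases h4 : gsaDots x = 4
          · simp [gsaStep, gsaPrio, h4, ih, List.append_assoc]
          · have hp : gsaPrio x = 4 := by
              simp only [gsaPrio]
              rw [if_neg]; omega
            simp [gsaStep, h1, h2, h3, h4, hp, ih, List.append_assoc]

theorem gsa_prio_range (s : String) : 0 ≤ gsaPrio s ∧ gsaPrio s ≤ 4 := by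
  simp only [gsaPrio]
  split_ifs <;> omega

-- ===== VERDICT (by name: the statement is the Claim_ definition above) =====
theorem get_shorter_api_spec : Claim_equal_get_shorter_api := by
  intro l _
  unfold Spec_get_shorter_api
  cases l with
  | nil => rfl
  | cons x t =>
    set l := x :: t with hl
    have hne : l ≠ [] := by simp [hl]
    obtain ⟨best, hbest⟩ : ∃ b, PySem.List.min? (l.map gsaPrio) (fun x => x) = some b := by
      cases hmm : PySem.List.min? (l.map gsaPrio) (fun x => x) with
      | none =>
        rw [PySem.List.min?_eq_none_iff] at hmm
        simp [hl] at hmm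
      | some b => exact ⟨b, rfl⟩
    have hmem := PySem.List.min?_mem hbest
    have hmin := PySem.List.min?_isMin hbest
    obtain ⟨x0, hx0l, hx0⟩ := List.mem_map.mp hmem
    have hrange := gsa_prio_range x0
    have hmin' : ∀ a ∈ l, best ≤ gsaPrio a := fun a ha =>
      hmin (gsaPrio a) (List.mem_map.mpr ⟨a, ha, rfl⟩)
    have hlow : ∀ i : Int, i < best → l.filter (fun a => gsaPrio a == i) = [] := by
      intro i hi
      rw [List.filter_eq_nil_iff]
      intro a ha hpa
      have := hmin' a ha
      simp only [beq_iff_eq] at hpa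
      omega
    have hhit : l.filter (fun a => gsaPrio a == best) ≠ [] := by
      intro hcon
      rw [List.filter_eq_nil_iff] at hcon
      exact hcon x0 hx0l (by simp [hx0])
    have hb0 : 0 ≤ best := by omega
    have hb4 : best ≤ 4 := by omega
    simp only [get_shorter_api, get_shorter_api_alt, if_neg hne, hbest, gsa_fold,
      List.nil_append]
    interval_cases best
    · rw [if_pos hhit]
    · rw [if_neg (by simpa using hlow 0 (by norm_num)), if_pos hhit]
    · rw [if_neg (by simpa using hlow 0 (by norm_num)),
        if_neg (by simpa using hlow 1 (by norm_num)), if_pos hhit]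
    · rw [if_neg (by simpa using hlow 0 (by norm_num)),
        if_neg (by simpa using hlow 1 (by norm_num)),
        if_neg (by simpa using hlow 2 (by norm_num)), if_pos hhit]
    · rw [if_neg (by simpa using hlow 0 (by norm_num)),
        if_neg (by simpa using hlow 1 (by norm_num)),
        if_neg (by simpa using hlow 2 (by norm_num)),
        if_neg (by simpa using hlow 3 (by norm_num))]
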